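-- pv_equiv track=rewrite | github.com/aboudnairoukh/boggle_game | ex12_utils.py | max_score_paths
-- ===== SOURCE A (Python) =====
-- import copy
--
-- MOVES = [(1, 0), (0, 1), (-1, 0), (0, -1), (1, 1), (-1, -1), (1, -1), (-1, 1)]
--
-- def is_in_bound(coordinate, board):
--     """this function checks if the coordinates given are out of the
--     board bounds"""
--     if (coordinate[0] < 0 or coordinate[0] > len(board) - 1 or
--             coordinate[1] > len(board[0]) - 1 or coordinate[1] < 0):
--         return False
--     return True
--
-- def find_length_n_helper(n, board, words, temp_word, path, paths,
--                          n_is_word_len, cur_coord):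
--     """this function returns a list of all the possible n length paths or
--     n length words on the board that matches with one the words in a
--     words list"""
--     path.append(cur_coord)
--     temp_word += board[cur_coord[0]][cur_coord[1]]
--     if not n_is_word_len:
--         if len(path) == n:
--             if binary_search(words, 0, len(words)-1, temp_word, False) != -1:
--                 paths.append(copy.deepcopy(path))
--             return
--     else:
--         if len(temp_word) == n:
--             if binary_search(words, 0, len(words)-1, temp_word, False) != -1:
--                 paths.append(copy.deepcopy(path))
--             return
--     for move in MOVES:
--         temp_coord = (cur_coord[0] + move[0], cur_coord[1] + move[1])
--         if temp_coord in path or not is_in_bound(temp_coord, board) or \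
--                 binary_search(words, 0, len(words)-1, temp_word, True) == -1:
--             continue
--         find_length_n_helper(n, board, words, temp_word, path, paths,
--                              n_is_word_len, temp_coord)
--         if not path:
--             return
--         path.pop()
--
-- def binary_search(lst, low, high, x, is_sliced_path):
--     """binary search function for searching for a word in a words list"""
--     if high >= low:
--         mid = (high + low) // 2
--         if is_sliced_path and len(x) <= len(lst[mid]) and \
--                 lst[mid][:len(x)] == x:
--             return mid
--         elif not is_sliced_path and lst[mid] == x:
--             return mid
--         elif lst[mid] > x:
--             return binary_search(lst, low, mid - 1, x, is_sliced_path)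
--         else:
--             return binary_search(lst, mid + 1, high, x, is_sliced_path)
--     else:
--         return -1
--
-- def coords_to_word(board, path):
--     """this function converts coordinates to the word on the board"""
--     word = ""
--     for coord in path:
--         word += board[coord[0]][coord[1]]
--     return word
--
-- def find_length_n_paths(n, board, words):
--     """This function  returns all n length valid paths"""
--     return all_cords_find_len(n, board, words, False, len(board),
--                               len(board[0]))
--
-- def all_cords_find_len(n, board, words, n_is_word_len, height, width):
--     """This function returns the n length paths that starts in every
--     coordinate on the board using 'find_length_n_helper' function"""
--     paths = []
--     if 0 < n and words:
--         for i in range(height):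
--             for j in range(width):
--                 find_length_n_helper(n, board, sorted(words), '', [], paths,
--                                      n_is_word_len, (i, j))
--     return paths
--
-- def max_score_paths(board, words):
--     """This function returns all the valid paths in the board """
--     filtered_paths = []
--     filtered_words = []
--     paths = []
--     for num in range(len(board)*len(board[0]), 0, -1):
--         paths += find_length_n_paths(num, board, words)
--     for path in paths:
--         temp_word = coords_to_word(board, path)
--         if temp_word not in filtered_words:
--             filtered_paths.append(path)
--             filtered_words.append(temp_word)
--     return filtered_paths
-- ===== SOURCE B (Python) =====
-- MOVES = [(1, 0), (0, 1), (-1, 0), (0, -1), (1, 1), (-1, -1), (1, -1), (-1, 1)]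
--
--
-- def binary_search(lst, low, high, x, is_sliced_path):
--     """binary search for an exact word (or, with is_sliced_path, for any
--     word having x as a prefix) in a sorted word list"""
--     if high >= low:
--         mid = (high + low) // 2
--         if is_sliced_path and len(x) <= len(lst[mid]) and \
--                 lst[mid][:len(x)] == x:
--             return mid
--         elif not is_sliced_path and lst[mid] == x:
--             return mid
--         elif lst[mid] > x:
--             return binary_search(lst, low, mid - 1, x, is_sliced_path)
--         else:
--             return binary_search(lst, mid + 1, high, x, is_sliced_path)
--     else:
--         return -1
--
--
-- def max_score_paths(board, words):
--     """All valid word paths, longest first, one path per distinct word.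
--
--     One prefix-pruned DFS per start cell collects the valid paths of every
--     length at once (instead of one bounded DFS per (length, start cell));
--     the words are sorted once; results are bucketed by length and
--     deduplicated with a set."""
--     height, width = len(board), len(board[0])
--     if not words:
--         return []
--     sorted_words = sorted(words)
--     found = []  # (path, word) pairs in (start cell, DFS) discovery order
--
--     def dfs(i, j, path, word):
--         word += board[i][j]
--         path.append((i, j))
--         if binary_search(sorted_words, 0, len(sorted_words) - 1, word,
--                          False) != -1:
--             found.append((list(path), word))
--         if binary_search(sorted_words, 0, len(sorted_words) - 1, word,
--                          True) != -1:
--             for di, dj in MOVES: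
--                 ni, nj = i + di, j + dj
--                 if 0 <= ni < height and 0 <= nj < width and \
--                         (ni, nj) not in path:
--                     dfs(ni, nj, path, word)
--         path.pop()
--
--     for i in range(height):
--         for j in range(width):
--             dfs(i, j, [], '')
--
--     buckets = {}
--     for path, word in found:
--         buckets.setdefault(len(path), []).append((path, word))
--
--     result = []
--     seen = set()
--     for n in range(height * width, 0, -1):
--         for path, word in buckets.get(n, []):
--             if word not in seen:
--                 seen.add(word)
--                 result.append(path)
--     return result
-- ===== Notes on version B (the rewrite author's own statement) =====
-- stated objective: faster
-- what changed: One prefix-pruned DFS per start cell collects valid paths of every length at once (instead of one depth-bounded DFS per (length, start cell) pair), words are sorted once instead of inside the inner loop, results are bucketed by length and deduplicated with a set instead of a list scan.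
import Mathlib
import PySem

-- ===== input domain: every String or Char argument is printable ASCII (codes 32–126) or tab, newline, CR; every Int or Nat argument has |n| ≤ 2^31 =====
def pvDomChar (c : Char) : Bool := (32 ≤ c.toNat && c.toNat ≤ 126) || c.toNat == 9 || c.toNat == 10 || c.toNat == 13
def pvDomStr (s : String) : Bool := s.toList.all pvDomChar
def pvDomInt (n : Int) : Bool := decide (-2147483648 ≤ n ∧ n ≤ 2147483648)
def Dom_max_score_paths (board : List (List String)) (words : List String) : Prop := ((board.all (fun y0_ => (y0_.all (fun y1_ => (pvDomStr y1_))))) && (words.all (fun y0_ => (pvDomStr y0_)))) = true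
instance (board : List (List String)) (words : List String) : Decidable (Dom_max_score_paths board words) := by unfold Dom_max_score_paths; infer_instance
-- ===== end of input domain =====

-- B replaces A's per-(length, start-cell) bounded DFS sweeps by ONE prefix-pruned DFS per
-- start cell collecting paths of every length at once, sorts the words once, buckets results
-- by length and deduplicates with a set.

-- ===== PORT A =====
def pvMoves : List (Int × Int) := [(1, 0), (0, 1), (-1, 0), (0, -1), (1, 1), (-1, -1), (1, -1), (-1, 1)]

def is_in_bound (coordinate : Int × Int) (board : List (List String)) : Bool :=
  if coordinate.1 < 0 ∨ coordinate.1 > PySem.List.len board - 1 ∨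
      coordinate.2 > PySem.List.len (PySem.List.pyGetD board 0 []) - 1 ∨ coordinate.2 < 0 then
    false
  else
    true

-- lst[mid] is rendered with pyGetD: on every call A's Python makes, 0 ≤ low and high ≤ len lst - 1,
-- so mid is in range and the default is never used.
def binary_search (lst : List String) (low high : Int) (x : String) (is_sliced_path : Bool) : Int :=
  if h : high ≥ low then
    let mid := PySem.Int.floordiv (high + low) 2
    let m := PySem.List.pyGetD lst mid ""
    if is_sliced_path = true ∧ PySem.Str.len x ≤ PySem.Str.len m ∧
        PySem.Str.slice m none (some (PySem.Str.len x)) = x then mid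
    else if is_sliced_path = false ∧ m = x then mid
    else if x < m then binary_search lst low (mid - 1) x is_sliced_path
    else binary_search lst (mid + 1) high x is_sliced_path
  else -1
termination_by (high + 1 - low).toNat
decreasing_by
  all_goals
    have hb := PySem.Int.floordiv_two_mid_bounds (lo := low) (hi := high) (by omega)
    rw [show low + high = high + low from by ring] at hb
    omega

def coords_to_word (board : List (List String)) (path : List (Int × Int)) : String :=
  path.foldl (fun word coord => word ++ PySem.List.pyGetD (PySem.List.pyGetD board coord.1 []) coord.2 "") ""

-- Python mutates `path`/`paths`; the port returns the pair (path, paths) after the call.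
-- The `fuel` argument only makes the recursion structural; at the fuel A's caller passes it never runs out.
def find_length_n_helper (fuel : Nat) (n : Int) (board : List (List String)) (words : List String)
    (temp_word : String) (path : List (Int × Int)) (paths : List (List (Int × Int)))
    (n_is_word_len : Bool) (cur_coord : Int × Int) : List (Int × Int) × List (List (Int × Int)) :=
  match fuel with
  | 0 => (path, paths)
  | fuel + 1 =>
    let path := path ++ [cur_coord]
    let temp_word := temp_word ++ PySem.List.pyGetD (PySem.List.pyGetD board cur_coord.1 []) cur_coord.2 ""
    let stop : Bool := if n_is_word_len then decide (PySem.Str.len temp_word = n) else decide (PySem.List.len path = n)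
    if stop then
      (path,
        if binary_search words 0 (PySem.List.len words - 1) temp_word false ≠ -1 then paths ++ [path] else paths)
    else
      -- `for move in MOVES` with the (dead in practice) `if not path: return` rendered as a done-flag
      let st := pvMoves.foldl
        (fun (st : List (Int × Int) × List (List (Int × Int)) × Bool) move =>
          if st.2.2 then st
          else
            let temp_coord := (cur_coord.1 + move.1, cur_coord.2 + move.2)
            if temp_coord ∈ st.1 ∨ is_in_bound temp_coord board = false ∨
                binary_search words 0 (PySem.List.len words - 1) temp_word true = -1 then st
            else
              let r := find_length_n_helper fuel n board words temp_word st.1 st.2.1 n_is_word_len temp_coord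
              if r.1 = [] then (r.1, r.2, true) else (r.1.dropLast, r.2, false))
        (path, paths, false)
      (st.1, st.2.1)

def all_cords_find_len (n : Int) (board : List (List String)) (words : List String)
    (n_is_word_len : Bool) (height width : Int) : List (List (Int × Int)) :=
  if 0 < n ∧ words ≠ [] then
    (PySem.List.pyRange 0 height 1).foldl (fun paths i =>
      (PySem.List.pyRange 0 width 1).foldl (fun paths j =>
        (find_length_n_helper ((height * width).toNat + 1) n board
          (PySem.List.sorted words (fun x => x) false) "" [] paths n_is_word_len (i, j)).2) paths) []
  else []

def find_length_n_paths (n : Int) (board : List (List String)) (words : List String) : List (List (Int × Int)) :=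
  all_cords_find_len n board words false (PySem.List.len board) (PySem.List.len (PySem.List.pyGetD board 0 []))

def max_score_paths (board : List (List String)) (words : List String) : List (List (Int × Int)) :=
  let paths := (PySem.List.pyRange (PySem.List.len board * PySem.List.len (PySem.List.pyGetD board 0 [])) 0 (-1)).foldl
    (fun acc num => acc ++ find_length_n_paths num board words) []
  (paths.foldl
    (fun (st : List (List (Int × Int)) × List String) path =>
      let temp_word := coords_to_word board path
      if temp_word ∈ st.2 then st else (st.1 ++ [path], st.2 ++ [temp_word]))
    ([], [])).1

-- ===== PORT B =====
-- One DFS from (i, j); `found` collects (path, word) pairs in discovery order.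
-- `fuel` only makes the recursion structural; the depth is bounded by the number of board cells.
def dfs_alt (fuel : Nat) (board : List (List String)) (sorted_words : List String) (height width : Int)
    (c : Int × Int) (path : List (Int × Int)) (word : String)
    (found : List (List (Int × Int) × String)) : List (List (Int × Int) × String) :=
  match fuel with
  | 0 => found
  | fuel + 1 =>
    let word := word ++ PySem.List.pyGetD (PySem.List.pyGetD board c.1 []) c.2 ""
    let path := path ++ [c]
    let found :=
      if binary_search sorted_words 0 (PySem.List.len sorted_words - 1) word false ≠ -1 then
        found ++ [(path, word)]
      else found
    if binary_search sorted_words 0 (PySem.List.len sorted_words - 1) word true ≠ -1 then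
      pvMoves.foldl
        (fun found move =>
          let t := (c.1 + move.1, c.2 + move.2)
          if 0 ≤ t.1 ∧ t.1 < height ∧ 0 ≤ t.2 ∧ t.2 < width ∧ t ∉ path then
            dfs_alt fuel board sorted_words height width t path word found
          else found)
        found
    else found

def max_score_paths_alt (board : List (List String)) (words : List String) : List (List (Int × Int)) :=
  let height := PySem.List.len board
  let width := PySem.List.len (PySem.List.pyGetD board 0 [])
  if words = [] then []
  else
    let sorted_words := PySem.List.sorted words (fun x => x) false
    let found := (PySem.List.pyRange 0 height 1).foldl (fun found i =>
      (PySem.List.pyRange 0 width 1).foldl (fun found j =>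
        dfs_alt ((height * width).toNat + 1) board sorted_words height width (i, j) [] "" found) found) []
    let buckets := found.foldl
      (fun (d : PySem.Dict Int (List (List (Int × Int) × String))) pw =>
        d.modify (PySem.List.len pw.1) [] (· ++ [pw]))
      PySem.Dict.empty
    ((PySem.List.pyRange (height * width) 0 (-1)).foldl
      (fun (st : List (List (Int × Int)) × PySem.Set String) n =>
        (buckets.getD n []).foldl
          (fun (st : List (List (Int × Int)) × PySem.Set String) pw =>
            if pw.2 ∈ st.2 then st else (st.1 ++ [pw.1], PySem.Set.add st.2 pw.2))
          st)
      ([], PySem.Set.empty)).1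

-- ===== PRECONDITION & SPEC =====
-- Pre_ excludes exactly the inputs where A raises IndexError: an empty board (len(board[0]) fails),
-- or — when the word list is nonempty, so the cell loops run — a board with a row shorter than its first row.
def Pre_max_score_paths (board : List (List String)) (words : List String) : Prop :=
  board ≠ [] ∧ (words = [] ∨ ∀ row ∈ board, (board.headD []).length ≤ row.length)
instance (board : List (List String)) (words : List String) : Decidable (Pre_max_score_paths board words) := by
  unfold Pre_max_score_paths; infer_instance

def pvWitness_max_score_paths : List (List String) × List String := ([["a", "b"], ["c", "d"]], ["ab", "ba", "cd"])

def Spec_max_score_paths (board : List (List String)) (words : List String) (out : List (List (Int × Int))) : Prop := out = max_score_paths_alt board words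
instance (board : List (List String)) (words : List String) (out : List (List (Int × Int))) : Decidable (Spec_max_score_paths board words out) := by unfold Spec_max_score_paths; infer_instance

-- ===== CLAIM (what is proved, stated in full; the proofs are below) =====
def Claim_equal_max_score_paths : Prop := ∀ (board : List (List String)) (words : List String), Dom_max_score_paths board words → Pre_max_score_paths board words → Spec_max_score_paths board words (max_score_paths board words)

-- ===== LEMMAS AND PROOFS =====

lemma dfs_acc (fuel : Nat) : ∀ (board : List (List String)) (sw : List String) (H W : Int)
    (c : Int × Int) (path : List (Int × Int)) (word : String) (found : List (List (Int × Int) × String)),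
    dfs_alt fuel board sw H W c path word found = found ++ dfs_alt fuel board sw H W c path word [] := by
  induction fuel with
  | zero => intro board sw H W c path word found; simp [dfs_alt]
  | succ fuel ih =>
    intro board sw H W c path word found
    simp only [dfs_alt]
    have loop : ∀ (ms : List (Int × Int)) (f : List (List (Int × Int) × String)),
        ms.foldl (fun found move =>
          if 0 ≤ c.1 + move.1 ∧ c.1 + move.1 < H ∧ 0 ≤ c.2 + move.2 ∧ c.2 + move.2 < W ∧
              (c.1 + move.1, c.2 + move.2) ∉ path ++ [c] then
            dfs_alt fuel board sw H W (c.1 + move.1, c.2 + move.2) (path ++ [c])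
              (word ++ PySem.List.pyGetD (PySem.List.pyGetD board c.1 []) c.2 "") found
          else found) f
        = f ++ ms.foldl (fun found move =>
          if 0 ≤ c.1 + move.1 ∧ c.1 + move.1 < H ∧ 0 ≤ c.2 + move.2 ∧ c.2 + move.2 < W ∧
              (c.1 + move.1, c.2 + move.2) ∉ path ++ [c] then
            dfs_alt fuel board sw H W (c.1 + move.1, c.2 + move.2) (path ++ [c])
              (word ++ PySem.List.pyGetD (PySem.List.pyGetD board c.1 []) c.2 "") found
          else found) [] := by
      intro ms
      induction ms with
      | nil => intro f; simp
      | cons mv ms ihm =>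
        intro f
        simp only [List.foldl_cons]
        rw [ihm]
        conv_rhs => rw [ihm]
        split
        · rw [ih _ _ _ _ _ _ _ f, List.append_assoc]
        · simp
    split_ifs with h1 h2 h3
    · rw [loop pvMoves, loop pvMoves ([] ++ _)]; simp
    · exact loop pvMoves found
    · simp
    · simp

def pvCell (board : List (List String)) (c : Int × Int) : String :=
  PySem.List.pyGetD (PySem.List.pyGetD board c.1 []) c.2 ""

lemma ctw_append (board : List (List String)) (p : List (Int × Int)) (c : Int × Int) :
    coords_to_word board (p ++ [c]) = coords_to_word board p ++ pvCell board c := by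
  simp [coords_to_word, pvCell, List.foldl_append]

lemma dfs_mem (fuel : Nat) : ∀ (board : List (List String)) (sw : List String) (H W : Int)
    (c : Int × Int) (path : List (Int × Int)) (word : String) (found : List (List (Int × Int) × String))
    (pw : List (Int × Int) × String), pw ∈ dfs_alt fuel board sw H W c path word found →
    pw ∈ found ∨ (path.length + 1 ≤ pw.1.length ∧
      (coords_to_word board path = word → coords_to_word board pw.1 = pw.2)) := by
  induction fuel with
  | zero => intro board sw H W c path word found pw h; simp [dfs_alt] at h; exact Or.inl h
  | succ fuel ih =>
    intro board sw H W c path word found pw h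
    simp only [dfs_alt] at h
    have hfound' : pw ∈ (if binary_search sw 0 (PySem.List.len sw - 1)
          (word ++ PySem.List.pyGetD (PySem.List.pyGetD board c.1 []) c.2 "") false ≠ -1 then
          found ++ [(path ++ [c], word ++ PySem.List.pyGetD (PySem.List.pyGetD board c.1 []) c.2 "")]
        else found) →
        pw ∈ found ∨ (path.length + 1 ≤ pw.1.length ∧
          (coords_to_word board path = word → coords_to_word board pw.1 = pw.2)) := by
      intro hm
      split at hm
      · rcases List.mem_append.mp hm with hm | hm
        · exact Or.inl hm
        · simp only [List.mem_singleton] at hm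
          subst hm
          refine Or.inr ⟨by simp, fun hw => ?_⟩
          simp [ctw_append, pvCell, hw]
      · exact Or.inl hm
    have loopmem : ∀ (ms : List (Int × Int)) (acc : List (List (Int × Int) × String)),
        pw ∈ ms.foldl (fun found move =>
          if 0 ≤ c.1 + move.1 ∧ c.1 + move.1 < H ∧ 0 ≤ c.2 + move.2 ∧ c.2 + move.2 < W ∧
              (c.1 + move.1, c.2 + move.2) ∉ path ++ [c] then
            dfs_alt fuel board sw H W (c.1 + move.1, c.2 + move.2) (path ++ [c])
              (word ++ PySem.List.pyGetD (PySem.List.pyGetD board c.1 []) c.2 "") found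
          else found) acc →
        pw ∈ acc ∨ (path.length + 1 ≤ pw.1.length ∧
          (coords_to_word board path = word → coords_to_word board pw.1 = pw.2)) := by
      intro ms
      induction ms with
      | nil => intro acc hm; exact Or.inl hm
      | cons mv ms ihm =>
        intro acc hm
        simp only [List.foldl_cons] at hm
        rcases ihm _ hm with hm' | hP
        · split at hm'
          · rcases ih _ _ _ _ _ _ _ _ _ hm' with hm'' | ⟨hl, hwr⟩
            · exact Or.inl hm''
            · refine Or.inr ⟨?_, fun hw => ?_⟩
              · simp only [List.length_append, List.length_cons, List.length_nil] at hl; omega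
              · exact hwr (by simp [ctw_append, pvCell, hw])
          · exact Or.inl hm'
        · exact Or.inr hP
    split at h
    · rcases loopmem _ _ h with hm | hP
      · exact hfound' hm
      · exact Or.inr hP
    · exact hfound' h

-- the move loop of dfs_alt only appends to its accumulator
lemma dfs_loop_acc (fuel : Nat) (board : List (List String)) (sw : List String) (H W : Int)
    (c : Int × Int) (p : List (Int × Int)) (w : String) :
    ∀ (ms : List (Int × Int)) (f : List (List (Int × Int) × String)),
    ms.foldl (fun found move =>
      if 0 ≤ c.1 + move.1 ∧ c.1 + move.1 < H ∧ 0 ≤ c.2 + move.2 ∧ c.2 + move.2 < W ∧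
          (c.1 + move.1, c.2 + move.2) ∉ p then
        dfs_alt fuel board sw H W (c.1 + move.1, c.2 + move.2) p w found
      else found) f
    = f ++ ms.foldl (fun found move =>
      if 0 ≤ c.1 + move.1 ∧ c.1 + move.1 < H ∧ 0 ≤ c.2 + move.2 ∧ c.2 + move.2 < W ∧
          (c.1 + move.1, c.2 + move.2) ∉ p then
        dfs_alt fuel board sw H W (c.1 + move.1, c.2 + move.2) p w found
      else found) [] := by
  intro ms
  induction ms with
  | nil => intro f; simp
  | cons mv ms ihm =>
    intro f
    simp only [List.foldl_cons]
    rw [ihm]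
    conv_rhs => rw [ihm]
    split
    · rw [dfs_acc _ _ _ _ _ _ _ _ f, List.append_assoc]
    · simp

-- every pair the move loop of dfs_alt adds extends p and carries its word
lemma dfs_loop_mem (fuel : Nat) (board : List (List String)) (sw : List String) (H W : Int)
    (c : Int × Int) (p : List (Int × Int)) (w : String) :
    ∀ (ms : List (Int × Int)) (f : List (List (Int × Int) × String)) (pw : List (Int × Int) × String),
    pw ∈ ms.foldl (fun found move =>
      if 0 ≤ c.1 + move.1 ∧ c.1 + move.1 < H ∧ 0 ≤ c.2 + move.2 ∧ c.2 + move.2 < W ∧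
          (c.1 + move.1, c.2 + move.2) ∉ p then
        dfs_alt fuel board sw H W (c.1 + move.1, c.2 + move.2) p w found
      else found) f →
    pw ∈ f ∨ (p.length + 1 ≤ pw.1.length ∧ (coords_to_word board p = w → coords_to_word board pw.1 = pw.2)) := by
  intro ms
  induction ms with
  | nil => intro f pw h; exact Or.inl h
  | cons mv ms ihm =>
    intro f pw h
    simp only [List.foldl_cons] at h
    rcases ihm _ _ h with h' | hP
    · split at h'
      · exact dfs_mem _ _ _ _ _ _ _ _ _ _ h'
      · exact Or.inl h'
    · exact Or.inr hP

lemma inbound_iff (board : List (List String)) (t : Int × Int) :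
    is_in_bound t board = true ↔
      (0 ≤ t.1 ∧ t.1 < PySem.List.len board ∧ 0 ≤ t.2 ∧
        t.2 < PySem.List.len (PySem.List.pyGetD board 0 [])) := by
  simp only [is_in_bound]
  split_ifs with h
  · simp only [false_iff]; omega
  · simp only [true_iff]; omega

lemma core (fuel : Nat) : ∀ (n : Int) (board : List (List String)) (sw : List String)
    (cur : Int × Int) (path : List (Int × Int)) (word : String) (paths : List (List (Int × Int))),
    (path.length : Int) + 1 ≤ n → n - (path.length : Int) ≤ (fuel : Int) →
    find_length_n_helper fuel n board sw word path paths false cur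
      = (path ++ [cur],
         paths ++ ((dfs_alt fuel board sw (PySem.List.len board)
            (PySem.List.len (PySem.List.pyGetD board 0 [])) cur path word []).filter
              (fun pw => PySem.List.len pw.1 == n)).map (·.1)) := by
  induction fuel with
  | zero => intro n board sw cur path word paths hd hf; exfalso; simp at hf; omega
  | succ fuel ih =>
    intro n board sw cur path word paths hd hf
    simp only [find_length_n_helper, dfs_alt, Bool.false_eq_true, if_false, PySem.List.len_eq]
    have ihx : ∀ (cur' : Int × Int) (path₂ : List (Int × Int)) (word₂ : String) (paths₂ : List (List (Int × Int))),
        (path₂.length : Int) + 1 ≤ n → n - (path₂.length : Int) ≤ (fuel : Int) →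
        find_length_n_helper fuel n board sw word₂ path₂ paths₂ false cur'
          = (path₂ ++ [cur'],
             paths₂ ++ ((dfs_alt fuel board sw (board.length : Int)
                ((PySem.List.pyGetD board 0 []).length : Int) cur' path₂ word₂ []).filter
                (fun pw => (pw.1.length : Int) == n)).map (·.1)) := by
      intro cur' path₂ word₂ paths₂ h1 h2
      rw [ih n board sw cur' path₂ word₂ paths₂ h1 h2]
      simp only [PySem.List.len_eq]
    by_cases hstop : (((path ++ [cur]).length : Int) = n)
    · -- depth reached n: A records iff the exact search hits; B's deeper finds are all longer
      simp only [hstop, decide_true, if_true]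
      have hstopn : (path.length : Int) + 1 = n := by simpa using hstop
      have hone : ∀ w, List.filter (fun (pw : List (Int × Int) × String) => (pw.1.length : Int) == n)
          [(path ++ [cur], w)] = [(path ++ [cur], w)] := by
        intro w; simp [hstopn]
      by_cases hpre : binary_search sw 0 ((sw.length : Int) - 1)
          (word ++ PySem.List.pyGetD (PySem.List.pyGetD board cur.1 []) cur.2 "") true ≠ -1
      · rw [if_pos hpre]
        rw [dfs_loop_acc]
        have hdel : (pvMoves.foldl (fun found move =>
            if 0 ≤ cur.1 + move.1 ∧ cur.1 + move.1 < (board.length : Int) ∧ 0 ≤ cur.2 + move.2 ∧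
                cur.2 + move.2 < ((PySem.List.pyGetD board 0 []).length : Int) ∧
                (cur.1 + move.1, cur.2 + move.2) ∉ path ++ [cur] then
              dfs_alt fuel board sw (board.length : Int) ((PySem.List.pyGetD board 0 []).length : Int)
                (cur.1 + move.1, cur.2 + move.2) (path ++ [cur])
                (word ++ PySem.List.pyGetD (PySem.List.pyGetD board cur.1 []) cur.2 "") found
            else found) []).filter (fun pw => (pw.1.length : Int) == n) = [] := by
          apply List.filter_eq_nil_iff.mpr
          intro pw hpw
          rcases dfs_loop_mem fuel board sw (board.length : Int) ((PySem.List.pyGetD board 0 []).length : Int)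
              cur (path ++ [cur]) (word ++ PySem.List.pyGetD (PySem.List.pyGetD board cur.1 []) cur.2 "")
              pvMoves [] pw hpw with h' | ⟨hl, _⟩
          · simp at h'
          · simp only [beq_iff_eq]
            simp only [List.length_append, List.length_cons, List.length_nil] at hl hstop
            omega
        split_ifs with hex
        · rw [List.nil_append, List.filter_append, hdel, hone]
          simp
        · rw [List.filter_append, hdel]
          simp
      · rw [if_neg hpre]
        split_ifs with hex
        · rw [List.nil_append, hone]; simp
        · simp
    · -- depth below n: both sides walk the same move list
      have hlt : (path.length : Int) + 1 < n := by
        simp only [List.length_append, List.length_cons, List.length_nil] at hstop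
        push_cast at hstop ⊢
        omega
      have hstopn' : ¬ ((path.length : Int) + 1 = n) := by
        intro h; exact hstop (by simpa using h)
      have hstop' : ((((path ++ [cur]).length : Int)) = n) = False :=
        eq_false (fun h => hstopn' (by simpa using h))
      simp only [hstop', decide_false, Bool.false_eq_true, if_false]
      have hnrec : ∀ w, List.filter (fun (pw : List (Int × Int) × String) => (pw.1.length : Int) == n)
          [(path ++ [cur], w)] = [] := by
        intro w; simp [hstopn']
      by_cases hpre : binary_search sw 0 ((sw.length : Int) - 1)
          (word ++ PySem.List.pyGetD (PySem.List.pyGetD board cur.1 []) cur.2 "") true ≠ -1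
      · rw [if_pos hpre]
        have jloop : ∀ (ms : List (Int × Int)) (ps : List (List (Int × Int))),
            ms.foldl (fun (st : List (Int × Int) × List (List (Int × Int)) × Bool) move =>
              if st.2.2 then st
              else
                if (cur.1 + move.1, cur.2 + move.2) ∈ st.1 ∨
                    is_in_bound (cur.1 + move.1, cur.2 + move.2) board = false ∨
                    binary_search sw 0 ((sw.length : Int) - 1)
                      (word ++ PySem.List.pyGetD (PySem.List.pyGetD board cur.1 []) cur.2 "") true = -1 then st
                else
                  let r := find_length_n_helper fuel n board sw
                    (word ++ PySem.List.pyGetD (PySem.List.pyGetD board cur.1 []) cur.2 "") st.1 st.2.1 false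
                    (cur.1 + move.1, cur.2 + move.2)
                  if r.1 = [] then (r.1, r.2, true) else (r.1.dropLast, r.2, false)) (path ++ [cur], ps, false)
            = (path ++ [cur], ps ++ ((ms.foldl (fun found move =>
                if 0 ≤ cur.1 + move.1 ∧ cur.1 + move.1 < (board.length : Int) ∧ 0 ≤ cur.2 + move.2 ∧
                    cur.2 + move.2 < ((PySem.List.pyGetD board 0 []).length : Int) ∧
                    (cur.1 + move.1, cur.2 + move.2) ∉ path ++ [cur] then
                  dfs_alt fuel board sw (board.length : Int) ((PySem.List.pyGetD board 0 []).length : Int)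
                    (cur.1 + move.1, cur.2 + move.2) (path ++ [cur])
                    (word ++ PySem.List.pyGetD (PySem.List.pyGetD board cur.1 []) cur.2 "") found
                else found) []).filter (fun pw => (pw.1.length : Int) == n)).map (·.1), false) := by
          intro ms
          induction ms with
          | nil => intro ps; simp
          | cons mv ms ihm =>
            intro ps
            simp only [List.foldl_cons]
            by_cases hC : 0 ≤ cur.1 + mv.1 ∧ cur.1 + mv.1 < (board.length : Int) ∧ 0 ≤ cur.2 + mv.2 ∧
                cur.2 + mv.2 < ((PySem.List.pyGetD board 0 []).length : Int) ∧
                (cur.1 + mv.1, cur.2 + mv.2) ∉ path ++ [cur]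
            · have hskip : ¬ ((cur.1 + mv.1, cur.2 + mv.2) ∈ path ++ [cur] ∨
                  is_in_bound (cur.1 + mv.1, cur.2 + mv.2) board = false ∨
                  binary_search sw 0 ((sw.length : Int) - 1)
                    (word ++ PySem.List.pyGetD (PySem.List.pyGetD board cur.1 []) cur.2 "") true = -1) := by
                push_neg
                refine ⟨hC.2.2.2.2, ?_, fun h => hpre h⟩
                simp only [ne_eq, Bool.not_eq_false]
                rw [inbound_iff]
                simp only [PySem.List.len_eq]
                exact ⟨hC.1, hC.2.1, hC.2.2.1, hC.2.2.2.1⟩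
              rw [if_pos hC]
              simp only [Bool.false_eq_true, if_false]
              rw [if_neg hskip]
              rw [ihx (cur.1 + mv.1, cur.2 + mv.2) (path ++ [cur])
                (word ++ PySem.List.pyGetD (PySem.List.pyGetD board cur.1 []) cur.2 "") ps
                (by simp only [List.length_append, List.length_cons, List.length_nil]; push_cast; omega)
                (by simp only [List.length_append, List.length_cons, List.length_nil]; push_cast at hf ⊢; omega)]
              have hne : (path ++ [cur]) ++ [(cur.1 + mv.1, cur.2 + mv.2)] ≠ [] := by simp
              rw [if_neg hne]
              simp only [List.dropLast_concat]
              rw [ihm]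
              rw [dfs_loop_acc fuel board sw (board.length : Int) ((PySem.List.pyGetD board 0 []).length : Int)
                cur (path ++ [cur]) (word ++ PySem.List.pyGetD (PySem.List.pyGetD board cur.1 []) cur.2 "") ms
                (dfs_alt fuel board sw (board.length : Int) ((PySem.List.pyGetD board 0 []).length : Int)
                  (cur.1 + mv.1, cur.2 + mv.2) (path ++ [cur])
                  (word ++ PySem.List.pyGetD (PySem.List.pyGetD board cur.1 []) cur.2 "") [])]
              rw [List.filter_append, List.map_append, List.append_assoc]
            · have hskip : ((cur.1 + mv.1, cur.2 + mv.2) ∈ path ++ [cur] ∨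
                  is_in_bound (cur.1 + mv.1, cur.2 + mv.2) board = false ∨
                  binary_search sw 0 ((sw.length : Int) - 1)
                    (word ++ PySem.List.pyGetD (PySem.List.pyGetD board cur.1 []) cur.2 "") true = -1) := by
                push_neg at hC
                by_cases hmem : (cur.1 + mv.1, cur.2 + mv.2) ∈ path ++ [cur]
                · exact Or.inl hmem
                · refine Or.inr (Or.inl ?_)
                  rw [Bool.eq_false_iff, Ne, inbound_iff]
                  simp only [PySem.List.len_eq]
                  intro hb
                  exact hmem (hC hb.1 hb.2.1 hb.2.2.1 hb.2.2.2)
              rw [if_neg hC]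
              simp only [Bool.false_eq_true, if_false]
              rw [if_pos hskip]
              exact ihm ps
        rw [jloop pvMoves paths]
        by_cases hex : binary_search sw 0 ((sw.length : Int) - 1)
            (word ++ PySem.List.pyGetD (PySem.List.pyGetD board cur.1 []) cur.2 "") false ≠ -1
        · rw [if_pos hex, List.nil_append]
          rw [dfs_loop_acc fuel board sw (board.length : Int) ((PySem.List.pyGetD board 0 []).length : Int) cur
            (path ++ [cur]) (word ++ PySem.List.pyGetD (PySem.List.pyGetD board cur.1 []) cur.2 "") pvMoves
            [(path ++ [cur], word ++ PySem.List.pyGetD (PySem.List.pyGetD board cur.1 []) cur.2 "")]]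
          rw [List.filter_append, hnrec, List.nil_append]
        · rw [if_neg hex]
      · rw [if_neg hpre]
        have hpre' : binary_search sw 0 ((sw.length : Int) - 1)
            (word ++ PySem.List.pyGetD (PySem.List.pyGetD board cur.1 []) cur.2 "") true = -1 := not_not.mp hpre
        have lskip : ∀ (ms : List (Int × Int)) (ps : List (List (Int × Int))),
            ms.foldl (fun (st : List (Int × Int) × List (List (Int × Int)) × Bool) move =>
              if st.2.2 then st
              else
                if (cur.1 + move.1, cur.2 + move.2) ∈ st.1 ∨
                    is_in_bound (cur.1 + move.1, cur.2 + move.2) board = false ∨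
                    binary_search sw 0 ((sw.length : Int) - 1)
                      (word ++ PySem.List.pyGetD (PySem.List.pyGetD board cur.1 []) cur.2 "") true = -1 then st
                else
                  let r := find_length_n_helper fuel n board sw
                    (word ++ PySem.List.pyGetD (PySem.List.pyGetD board cur.1 []) cur.2 "") st.1 st.2.1 false
                    (cur.1 + move.1, cur.2 + move.2)
                  if r.1 = [] then (r.1, r.2, true) else (r.1.dropLast, r.2, false)) (path ++ [cur], ps, false)
            = (path ++ [cur], ps, false) := by
          intro ms
          induction ms with
          | nil => intro ps; rfl
          | cons mv ms ihm =>
            intro ps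
            simp only [List.foldl_cons, Bool.false_eq_true, if_false]
            rw [if_pos (Or.inr (Or.inr hpre'))]
            exact ihm ps
        rw [lskip pvMoves paths]
        split_ifs with hex
        · rw [List.nil_append, hnrec]; simp
        · simp


lemma dedup_eq (board : List (List String)) :
    ∀ (L : List (List (Int × Int) × String)) (res : List (List (Int × Int))) (seen : List String),
    (∀ pw ∈ L, coords_to_word board pw.1 = pw.2) →
    (L.map (·.1)).foldl
        (fun (st : List (List (Int × Int)) × List String) path =>
          let temp_word := coords_to_word board path
          if temp_word ∈ st.2 then st else (st.1 ++ [path], st.2 ++ [temp_word])) (res, seen)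
      = L.foldl
        (fun (st : List (List (Int × Int)) × PySem.Set String) pw =>
          if pw.2 ∈ st.2 then st else (st.1 ++ [pw.1], PySem.Set.add st.2 pw.2)) (res, seen) := by
  intro L
  induction L with
  | nil => intro res seen _; rfl
  | cons pw L ihL =>
    intro res seen h
    have hw : coords_to_word board pw.1 = pw.2 := h pw (by simp)
    simp only [List.map_cons, List.foldl_cons, hw]
    by_cases hm : pw.2 ∈ seen
    · rw [if_pos hm, if_pos hm]
      exact ihL res seen (fun q hq => h q (by simp [hq]))
    · rw [if_neg hm, if_neg hm, PySem.Set.add_of_not_mem hm]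
      exact ihL _ _ (fun q hq => h q (by simp [hq]))

lemma bucket_getD (l : List (List (Int × Int) × String)) (nn : Int) :
    (l.foldl (fun (d : PySem.Dict Int (List (List (Int × Int) × String))) pw =>
        d.modify (PySem.List.len pw.1) [] (· ++ [pw])) PySem.Dict.empty).getD nn []
      = l.filter (fun pw => PySem.List.len pw.1 == nn) := by
  rw [← List.foldl_map (f := fun (pw : List (Int × Int) × String) => (PySem.List.len pw.1, pw))
    (g := fun (d : PySem.Dict Int (List (List (Int × Int) × String))) (p : Int × (List (Int × Int) × String)) =>
      d.modify p.1 [] (· ++ [p.2]))]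
  rw [PySem.Dict.getD_foldl_modify_append]
  simp [List.filter_map, Function.comp_def]

lemma mem_countdown {a x : Int} (h : x ∈ PySem.List.pyRange a 0 (-1)) : 0 < x ∧ x ≤ a := by
  rw [PySem.List.pyRange_neg_one] at h
  simp only [List.mem_map, List.mem_range] at h
  obtain ⟨k, hk, he⟩ := h
  omega

lemma ports_agree : ∀ (board : List (List String)) (words : List String),
    max_score_paths board words = max_score_paths_alt board words := by
  intro board words
  by_cases hw : words = []
  · subst hw
    simp [max_score_paths, max_score_paths_alt, find_length_n_paths, all_cords_find_len]
  · simp only [max_score_paths, max_score_paths_alt, find_length_n_paths, all_cords_find_len,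
      if_neg hw]
    have hHW : 0 ≤ PySem.List.len board * PySem.List.len (PySem.List.pyGetD board 0 []) := by
      simp only [PySem.List.len_eq]
      positivity
    have hF : PySem.List.len board * PySem.List.len (PySem.List.pyGetD board 0 []) < ((((PySem.List.len board * PySem.List.len (PySem.List.pyGetD board 0 [])).toNat + 1) : Nat) : Int) := by
      have h1 := Int.self_le_toNat (PySem.List.len board * PySem.List.len (PySem.List.pyGetD board 0 []))
      push_cast
      omega
    -- B's collected list, in flatMap form
    have hfound : (PySem.List.pyRange 0 (PySem.List.len board) 1).foldl (fun found i =>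
          (PySem.List.pyRange 0 (PySem.List.len (PySem.List.pyGetD board 0 [])) 1).foldl (fun found j =>
            dfs_alt ((PySem.List.len board * PySem.List.len (PySem.List.pyGetD board 0 [])).toNat + 1) board (PySem.List.sorted words (fun x => x) false) (PySem.List.len board) (PySem.List.len (PySem.List.pyGetD board 0 [])) (i, j) [] "" found) found) []
        = (PySem.List.pyRange 0 (PySem.List.len board) 1).flatMap (fun i => (PySem.List.pyRange 0 (PySem.List.len (PySem.List.pyGetD board 0 [])) 1).flatMap (fun j => dfs_alt ((PySem.List.len board * PySem.List.len (PySem.List.pyGetD board 0 [])).toNat + 1) board (PySem.List.sorted words (fun x => x) false) (PySem.List.len board) (PySem.List.len (PySem.List.pyGetD board 0 [])) (i, j) [] "" [])) := by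
      rw [PySem.List.foldl_congr_mem _ _ (init := _) (g := fun found i => found ++
          (PySem.List.pyRange 0 (PySem.List.len (PySem.List.pyGetD board 0 [])) 1).flatMap (fun j => dfs_alt ((PySem.List.len board * PySem.List.len (PySem.List.pyGetD board 0 [])).toNat + 1) board (PySem.List.sorted words (fun x => x) false) (PySem.List.len board) (PySem.List.len (PySem.List.pyGetD board 0 [])) (i, j) [] "" []))
        (fun acc i _ => by
          rw [PySem.List.foldl_congr_mem _ _ (init := _) (g := fun found j => found ++ dfs_alt ((PySem.List.len board * PySem.List.len (PySem.List.pyGetD board 0 [])).toNat + 1) board (PySem.List.sorted words (fun x => x) false) (PySem.List.len board) (PySem.List.len (PySem.List.pyGetD board 0 [])) (i, j) [] "" [])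
            (fun acc2 j _ => dfs_acc ((PySem.List.len board * PySem.List.len (PySem.List.pyGetD board 0 [])).toNat + 1) board (PySem.List.sorted words (fun x => x) false) (PySem.List.len board) (PySem.List.len (PySem.List.pyGetD board 0 [])) (i, j) [] "" acc2)]
          rw [PySem.List.foldl_append_eq_flatMap])]
      rw [PySem.List.foldl_append_eq_flatMap, List.nil_append]
    -- A's per-length result is the length-nn slice of B's list
    have hg : ∀ acc (nn : Int), nn ∈ PySem.List.pyRange (PySem.List.len board * PySem.List.len (PySem.List.pyGetD board 0 [])) 0 (-1) →
        acc ++ (if 0 < nn ∧ words ≠ [] then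
          (PySem.List.pyRange 0 (PySem.List.len board) 1).foldl (fun paths i =>
            (PySem.List.pyRange 0 (PySem.List.len (PySem.List.pyGetD board 0 [])) 1).foldl (fun paths j =>
              (find_length_n_helper ((PySem.List.len board * PySem.List.len (PySem.List.pyGetD board 0 [])).toNat + 1) nn board (PySem.List.sorted words (fun x => x) false) "" [] paths false (i, j)).2) paths) []
          else [])
        = acc ++ (((PySem.List.pyRange 0 (PySem.List.len board) 1).flatMap (fun i => (PySem.List.pyRange 0 (PySem.List.len (PySem.List.pyGetD board 0 [])) 1).flatMap (fun j => dfs_alt ((PySem.List.len board * PySem.List.len (PySem.List.pyGetD board 0 [])).toNat + 1) board (PySem.List.sorted words (fun x => x) false) (PySem.List.len board) (PySem.List.len (PySem.List.pyGetD board 0 [])) (i, j) [] "" []))).filter (fun pw => PySem.List.len pw.1 == nn)).map (·.1) := by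
      intro acc nn hnn
      obtain ⟨hn1, hn2⟩ := mem_countdown hnn
      rw [if_pos ⟨hn1, hw⟩]
      rw [PySem.List.foldl_congr_mem _ _ (init := _) (g := fun paths i => paths ++
          (PySem.List.pyRange 0 (PySem.List.len (PySem.List.pyGetD board 0 [])) 1).flatMap (fun j =>
            ((dfs_alt ((PySem.List.len board * PySem.List.len (PySem.List.pyGetD board 0 [])).toNat + 1) board (PySem.List.sorted words (fun x => x) false) (PySem.List.len board) (PySem.List.len (PySem.List.pyGetD board 0 [])) (i, j) [] "" []).filter (fun pw => PySem.List.len pw.1 == nn)).map (·.1)))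
        (fun acc2 i _ => by
          rw [PySem.List.foldl_congr_mem _ _ (init := _) (g := fun paths j => paths ++
              ((dfs_alt ((PySem.List.len board * PySem.List.len (PySem.List.pyGetD board 0 [])).toNat + 1) board (PySem.List.sorted words (fun x => x) false) (PySem.List.len board) (PySem.List.len (PySem.List.pyGetD board 0 [])) (i, j) [] "" []).filter (fun pw => PySem.List.len pw.1 == nn)).map (·.1))
            (fun acc3 j _ => by
              rw [core ((PySem.List.len board * PySem.List.len (PySem.List.pyGetD board 0 [])).toNat + 1) nn board (PySem.List.sorted words (fun x => x) false) (i, j) [] "" acc3 (by simp; omega)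
                (by
                  simp only [PySem.List.len_eq] at hn2 ⊢
                  simp only [List.length_nil, Nat.cast_zero, sub_zero]
                  push_cast
                  omega)])]
          rw [PySem.List.foldl_append_eq_flatMap])]
      rw [PySem.List.foldl_append_eq_flatMap, List.nil_append]
      simp only [List.filter_flatMap, List.map_flatMap]
    -- rewrite A's outer fold
    rw [PySem.List.foldl_congr_mem _ _ (init := _) (g := fun acc nn => acc ++
        (((PySem.List.pyRange 0 (PySem.List.len board) 1).flatMap (fun i => (PySem.List.pyRange 0 (PySem.List.len (PySem.List.pyGetD board 0 [])) 1).flatMap (fun j => dfs_alt ((PySem.List.len board * PySem.List.len (PySem.List.pyGetD board 0 [])).toNat + 1) board (PySem.List.sorted words (fun x => x) false) (PySem.List.len board) (PySem.List.len (PySem.List.pyGetD board 0 [])) (i, j) [] "" []))).filter (fun pw => PySem.List.len pw.1 == nn)).map (·.1)) hg]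
    rw [PySem.List.foldl_append_eq_flatMap, List.nil_append]
    -- rewrite B's found and buckets
    rw [hfound]
    rw [PySem.List.foldl_congr_mem _ _ (init := _) (g := fun (st : List (List (Int × Int)) × PySem.Set String) nn =>
        (((PySem.List.pyRange 0 (PySem.List.len board) 1).flatMap (fun i => (PySem.List.pyRange 0 (PySem.List.len (PySem.List.pyGetD board 0 [])) 1).flatMap (fun j => dfs_alt ((PySem.List.len board * PySem.List.len (PySem.List.pyGetD board 0 [])).toNat + 1) board (PySem.List.sorted words (fun x => x) false) (PySem.List.len board) (PySem.List.len (PySem.List.pyGetD board 0 [])) (i, j) [] "" []))).filter (fun pw => PySem.List.len pw.1 == nn)).foldl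
          (fun st pw => if pw.2 ∈ st.2 then st else (st.1 ++ [pw.1], PySem.Set.add st.2 pw.2)) st)
      (fun st nn _ => by rw [bucket_getD])]
    rw [← List.foldl_flatMap]
    rw [← List.map_flatMap]
    have hwords : ∀ pw ∈ (PySem.List.pyRange (PySem.List.len board * PySem.List.len (PySem.List.pyGetD board 0 [])) 0 (-1)).flatMap (fun nn =>
        ((PySem.List.pyRange 0 (PySem.List.len board) 1).flatMap (fun i => (PySem.List.pyRange 0 (PySem.List.len (PySem.List.pyGetD board 0 [])) 1).flatMap (fun j => dfs_alt ((PySem.List.len board * PySem.List.len (PySem.List.pyGetD board 0 [])).toNat + 1) board (PySem.List.sorted words (fun x => x) false) (PySem.List.len board) (PySem.List.len (PySem.List.pyGetD board 0 [])) (i, j) [] "" []))).filter (fun pw => PySem.List.len pw.1 == nn)),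
        coords_to_word board pw.1 = pw.2 := by
      intro pw hpw
      simp only [List.mem_flatMap, List.mem_filter] at hpw
      obtain ⟨nn, -, ⟨i, -, j, -, hpd⟩, -⟩ := hpw
      rcases dfs_mem ((PySem.List.len board * PySem.List.len (PySem.List.pyGetD board 0 [])).toNat + 1) board (PySem.List.sorted words (fun x => x) false) (PySem.List.len board) (PySem.List.len (PySem.List.pyGetD board 0 [])) (i, j) [] "" [] pw hpd with h0 | ⟨_, hctw⟩
      · simp at h0
      · exact hctw rfl
    rw [dedup_eq board _ [] [] hwords]
    rfl

-- ===== VERDICT (by name: the statement is the Claim_ definition above) =====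
theorem max_score_paths_spec : Claim_equal_max_score_paths := by
  intro board words _ _
  unfold Spec_max_score_paths
  exact ports_agree board words
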